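-- pv_equiv track=rewrite | github.com/danielholmes839/dsc-workshops | ITI1120-midterm-review/solutions/test2.py | pattern_to_stars
-- ===== SOURCE A (Python) =====
-- def pattern_to_stars(s, p):
--     i = 0        # Index of the character
--     count = 1    # How many stars to add
--     string = ""  # How many
--
--     while i < len(s):
--         if s[i:i+len(p)] == p:
--             # Found the pattern
--             string += "*"*count
--             count += 1
--             i += len(p)
--
--         else:
--             string += s[i]
--             i += 1
--
--     return string
-- ===== SOURCE B (Python) =====
-- def pattern_to_stars(s, p):
--     if not p:
--         return ""
--     parts = []
--     count = 1
--     i = 0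
--     while True:
--         j = s.find(p, i)
--         if j == -1:
--             parts.append(s[i:])
--             break
--         parts.append(s[i:j])
--         parts.append("*" * count)
--         count += 1
--         i = j + len(p)
--     return "".join(parts)
-- ===== Notes on version B (the rewrite author's own statement) =====
-- stated objective: faster
-- what changed: B jumps directly between pattern occurrences with str.find and joins collected pieces, instead of comparing a fresh slice against p at every index and growing the result string character by character.
import Mathlib
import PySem

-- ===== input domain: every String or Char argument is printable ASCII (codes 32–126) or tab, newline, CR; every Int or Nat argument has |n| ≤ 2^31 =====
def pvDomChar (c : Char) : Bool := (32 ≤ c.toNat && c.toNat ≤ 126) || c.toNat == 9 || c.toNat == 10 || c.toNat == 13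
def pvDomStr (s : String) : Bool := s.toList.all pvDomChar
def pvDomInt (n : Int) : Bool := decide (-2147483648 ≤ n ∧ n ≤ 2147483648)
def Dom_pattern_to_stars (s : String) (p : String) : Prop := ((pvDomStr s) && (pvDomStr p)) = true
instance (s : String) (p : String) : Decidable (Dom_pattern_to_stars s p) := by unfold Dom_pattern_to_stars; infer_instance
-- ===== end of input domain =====

-- B replaces A's per-index slice comparison and char-by-char string growth by find-and-jump
-- between occurrences, joining the collected pieces (objective: faster).

-- ===== PORT A =====
-- A's loop over index i on s is transcribed as recursion over the remaining suffix of
-- s.toList (the suffix s[i:]); the test s[i:i+len(p)] == p is rem.take p.length = p (exact,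
-- since 0 ≤ i in A's loop), s[i] is the head of the suffix, and the loop is made total with
-- a fuel counter (one unit per iteration; fuel s.length suffices whenever A terminates,
-- i.e. whenever p ≠ "" or s = "" — exactly Pre_ below).
def ptsLoopA (pl : List Char) : Nat → List Char → Nat → List Char
  | 0, _, _ => []
  | fuel + 1, rem, count =>
    match rem with
    | [] => []
    | c :: rest =>
      if rem.take pl.length = pl then
        List.replicate count '*' ++ ptsLoopA pl fuel (rem.drop pl.length) (count + 1)
      else
        c :: ptsLoopA pl fuel rest count

def pattern_to_stars (s : String) (p : String) : String :=
  String.ofList (ptsLoopA p.toList s.toList.length s.toList 1)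

-- ===== PORT B =====
-- s.find(p, i) relative to the suffix s[i:]: offset of the first occurrence of pl, or none.
def ptsFind (pl : List Char) : List Char → Option Nat
  | [] => if pl.isPrefixOf ([] : List Char) then some 0 else none
  | c :: t => if pl.isPrefixOf (c :: t) then some 0 else (ptsFind pl t).map (· + 1)

-- Source B's while-True loop: each iteration emits s[i:j], the star run, and jumps past the
-- occurrence; fueled (fuel s.length + 1 suffices because here pl ≠ []).
def ptsLoopB (pl : List Char) : Nat → List Char → Nat → List Char
  | 0, _, _ => []
  | fuel + 1, rem, count =>
    match ptsFind pl rem with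
    | none => rem
    | some k => rem.take k ++ List.replicate count '*'
                  ++ ptsLoopB pl fuel (rem.drop (k + pl.length)) (count + 1)

def pattern_to_stars_alt (s : String) (p : String) : String :=
  if p.toList = [] then ""
  else String.ofList (ptsLoopB p.toList (s.toList.length + 1) s.toList 1)

-- ===== PRECONDITION & SPEC =====
-- Pre_ excludes p = "" with s ≠ "": there A never returns (s[i:i+0] == "" matches at every
-- step and i += len(p) never advances, an infinite loop).
def Pre_pattern_to_stars (s : String) (p : String) : Prop := p ≠ "" ∨ s = ""
instance (s : String) (p : String) : Decidable (Pre_pattern_to_stars s p) := by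
  unfold Pre_pattern_to_stars; infer_instance

def pvWitness_pattern_to_stars : String × String := ("abcabc", "bc")

def Spec_pattern_to_stars (s : String) (p : String) (out : String) : Prop := out = pattern_to_stars_alt s p
instance (s : String) (p : String) (out : String) : Decidable (Spec_pattern_to_stars s p out) := by unfold Spec_pattern_to_stars; infer_instance

-- ===== CLAIM (what is proved, stated in full; the proofs are below) =====
def Claim_equal_pattern_to_stars : Prop := ∀ (s : String) (p : String), Dom_pattern_to_stars s p → Pre_pattern_to_stars s p → Spec_pattern_to_stars s p (pattern_to_stars s p)

-- ===== LEMMAS AND PROOFS =====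

-- ptsFind finds an actual occurrence, and the occurrence fits inside rem.
theorem ptsFind_some {pl rem : List Char} {k : Nat} (h : ptsFind pl rem = some k) :
    pl.isPrefixOf (rem.drop k) = true ∧ k + pl.length ≤ rem.length := by
  induction rem generalizing k with
  | nil =>
    by_cases hp : pl.isPrefixOf ([] : List Char)
    · have hk : k = 0 := by simp [ptsFind, hp] at h; omega
      subst hk
      have hpl : pl = [] := by
        simpa [List.prefix_nil] using List.isPrefixOf_iff_prefix.mp hp
      simp [hpl]
    · simp [ptsFind, hp] at h
  | cons c t ih =>
    by_cases hp : pl.isPrefixOf (c :: t)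
    · have hk : k = 0 := by simp [ptsFind, hp] at h; omega
      subst hk
      refine ⟨by simpa using hp, ?_⟩
      have := (List.isPrefixOf_iff_prefix.mp hp).length_le
      simpa using this
    · simp [ptsFind, hp] at h
      obtain ⟨k', hk', rfl⟩ := h
      obtain ⟨h1, h2⟩ := ih hk'
      exact ⟨by simpa using h1, by simp; omega⟩

-- no occurrence anywhere: A's loop just copies rem.
theorem loopA_none {pl rem : List Char} (h : ptsFind pl rem = none)
    {fuel count : Nat} (hf : rem.length ≤ fuel) :
    ptsLoopA pl fuel rem count = rem := by
  induction rem generalizing fuel count with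
  | nil => cases fuel <;> simp [ptsLoopA]
  | cons c t ih =>
    cases fuel with
    | zero => simp at hf
    | succ f =>
      by_cases hp : pl.isPrefixOf (c :: t)
      · simp [ptsFind, hp] at h
      · have hne : (c :: t).take pl.length ≠ pl := by
          intro he
          exact hp (List.isPrefixOf_iff_prefix.mpr (he ▸ List.take_prefix _ _))
        simp [ptsFind, hp] at h
        simp only [ptsLoopA, if_neg hne]
        have := ih h (fuel := f) (count := count) (by simpa using Nat.le_of_succ_le_succ hf)
        simp [this]

theorem ptsFind_nil {pl : List Char} (hpl : pl ≠ []) : ptsFind pl [] = none := by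
  have : ¬ pl.isPrefixOf ([] : List Char) = true := by
    simp [List.isPrefixOf_iff_prefix, List.prefix_nil, hpl]
  simp [ptsFind, this]

-- B's loop does not depend on the fuel once the fuel exceeds rem.length.
theorem loopB_fuel {pl : List Char} (hpl : pl ≠ []) :
    ∀ n rem, rem.length ≤ n → ∀ f g count, rem.length < f → rem.length < g →
      ptsLoopB pl f rem count = ptsLoopB pl g rem count := by
  intro n
  induction n with
  | zero =>
    intro rem hn f g count hf hg
    have : rem = [] := List.eq_nil_of_length_eq_zero (Nat.le_zero.mp hn)
    subst this
    cases f with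
    | zero => omega
    | succ f' => cases g with
      | zero => omega
      | succ g' => simp [ptsLoopB, ptsFind_nil hpl]
  | succ n ih =>
    intro rem hn f g count hf hg
    cases f with
    | zero => omega
    | succ f' =>
      cases g with
      | zero => omega
      | succ g' =>
        cases hfind : ptsFind pl rem with
        | none => simp [ptsLoopB, hfind]
        | some k =>
          obtain ⟨_, hle⟩ := ptsFind_some hfind
          have hplpos : 0 < pl.length := List.length_pos_of_ne_nil hpl
          have hlen : (rem.drop (k + pl.length)).length < rem.length := by
            simp [List.length_drop]; omega
          simp only [ptsLoopB, hfind]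
          rw [ih (rem.drop (k + pl.length)) (by omega) f' g' (count + 1) (by omega) (by omega)]

-- Main lemma: A's scan equals B's find-and-jump loop.
theorem loopA_eq_loopB {pl : List Char} (hpl : pl ≠ []) :
    ∀ n rem, rem.length ≤ n → ∀ fuel count, rem.length ≤ fuel →
      ptsLoopA pl fuel rem count = ptsLoopB pl (rem.length + 1) rem count := by
  intro n
  induction n with
  | zero =>
    intro rem hn fuel count hf
    have : rem = [] := List.eq_nil_of_length_eq_zero (Nat.le_zero.mp hn)
    subst this
    cases fuel <;> simp [ptsLoopA, ptsLoopB, ptsFind_nil hpl]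
  | succ n ih =>
    intro rem hn fuel count hf
    have hplpos : 0 < pl.length := List.length_pos_of_ne_nil hpl
    cases hfind : ptsFind pl rem with
    | none =>
      rw [loopA_none hfind hf]
      simp [ptsLoopB, hfind]
    | some k =>
      obtain ⟨hpref, hle⟩ := ptsFind_some hfind
      have hrempos : 0 < rem.length := by omega
      cases rem with
      | nil => simp at hrempos
      | cons c t =>
        have hlt : t.length < fuel := by simp at hf; omega
        have htn : t.length ≤ n := by simp at hn; omega
        cases fuel with
        | zero => omega
        | succ f =>
          cases k with
          | zero =>
            have hp : pl.isPrefixOf (c :: t) = true := by simpa using hpref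
            have htake : (c :: t).take pl.length = pl := by
              have := List.isPrefixOf_iff_prefix.mp hp
              exact (List.prefix_iff_eq_take.mp this).symm
            have hdlen : ((c :: t).drop pl.length).length ≤ n := by
              simp [List.length_drop]; omega
            have hdfuel : ((c :: t).drop pl.length).length ≤ f := by
              simp [List.length_drop]; omega
            have hfb := loopB_fuel hpl ((c :: t).drop pl.length).length
                  ((c :: t).drop pl.length) (le_refl _)
                  (((c :: t).drop pl.length).length + 1) (t.length + 1) (count + 1)
                  (by omega) (by simp only [List.length_drop, List.length_cons]; omega)
            simp only [ptsLoopA, htake, ptsLoopB, hfind]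
            rw [ih ((c :: t).drop pl.length) hdlen f (count + 1) hdfuel, hfb]
            simp
          | succ k' =>
            have hp : ¬ pl.isPrefixOf (c :: t) = true := by
              intro hp; simp [ptsFind, hp] at hfind
            have hft : ptsFind pl t = some k' := by
              have h2 : (ptsFind pl t).map (· + 1) = some (k' + 1) := by
                simpa [ptsFind, hp] using hfind
              cases hmt : ptsFind pl t with
              | none => rw [hmt] at h2; simp at h2
              | some m =>
                rw [hmt] at h2
                simp at h2
                exact congrArg some h2
            have hne : (c :: t).take pl.length ≠ pl := by
              intro he
              exact hp (List.isPrefixOf_iff_prefix.mpr (he ▸ List.take_prefix _ _))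
            have hk'le := (ptsFind_some hft).2
            have hfb := loopB_fuel hpl (t.drop (k' + pl.length)).length
                  (t.drop (k' + pl.length)) (le_refl _)
                  t.length (t.length + 1) (count + 1)
                  (by simp only [List.length_drop]; omega) (by simp only [List.length_drop]; omega)
            simp only [ptsLoopA, if_neg hne]
            rw [ih t htn f count (by omega)]
            simp only [ptsLoopB, hft, hfind]
            rw [hfb]
            simp [Nat.succ_add, List.drop_succ_cons]

-- ===== VERDICT (by name: the statement is the Claim_ definition above) =====
theorem pattern_to_stars_spec : Claim_equal_pattern_to_stars := by
  intro s p _ hpre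
  unfold Spec_pattern_to_stars pattern_to_stars pattern_to_stars_alt
  by_cases hp : p.toList = []
  · have hs : s = "" := by
      rcases hpre with h | h
      · exact absurd (String.toList_eq_nil_iff.mp hp) h
      · exact h
    subst hs
    simp [hp, ptsLoopA]
  · rw [if_neg hp, loopA_eq_loopB hp s.toList.length s.toList (le_refl _) _ 1 (le_refl _)]
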